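-- pv_equiv track=rewrite | github.com/SauravSinha76/scaler2 | class42/min_absolute_diff.py | solve
-- ===== SOURCE A (Python) =====
-- def count_smaller(A,B):
--     l = 0
--     r = len(A) -1
--
--     while l <= r:
--         mid = (l + r) // 2
--
--         if A[mid] == B:
--             return mid
--         if A[mid] < B:
--             l = mid + 1
--         else:
--             r = mid -1
--     return l
--
-- def solve(A,B,C):
--     for i in range(A):
--         C[i].sort()
--
--     ans = 1 << 31
--
--     for i in range(A-1):
--         for j in range(B):
--
--             p = count_smaller(C[i+1],C[i][j])
--
--             if p == B:
--                 p -= 1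
--
--             ans = min(ans,abs(C[i+1][p] - C[i][j]))
--
--             if p > 0:
--                 ans = min(ans, abs(C[i + 1][p-1] - C[i][j]))
--     return ans
-- ===== SOURCE B (Python) =====
-- def solve(A, B, C):
--     for i in range(A):
--         C[i].sort()
--
--     ans = 1 << 31
--
--     for i in range(A - 1):
--         X = C[i]
--         Y = C[i + 1]
--         p = 0
--         q = 0
--         while p < len(X) and q < len(Y):
--             d = abs(X[p] - Y[q])
--             if d < ans:
--                 ans = d
--             if X[p] < Y[q]:
--                 p += 1
--             else:
--                 q += 1
--     return ans
-- ===== Notes on version B (the rewrite author's own statement) =====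
-- stated objective: faster
-- what changed: Replaces the per-element binary search (count_smaller plus neighbour checks) over each next row with a single two-pointer merge scan per adjacent pair of sorted rows.
-- outside the precondition, e.g. on solve(2, 1, [[5, 1], [4, 9]]): A returns 3, B returns 1; on solve(2, 0, [[1], [2]]): A returns 2147483648, B returns 1
import Mathlib
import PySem

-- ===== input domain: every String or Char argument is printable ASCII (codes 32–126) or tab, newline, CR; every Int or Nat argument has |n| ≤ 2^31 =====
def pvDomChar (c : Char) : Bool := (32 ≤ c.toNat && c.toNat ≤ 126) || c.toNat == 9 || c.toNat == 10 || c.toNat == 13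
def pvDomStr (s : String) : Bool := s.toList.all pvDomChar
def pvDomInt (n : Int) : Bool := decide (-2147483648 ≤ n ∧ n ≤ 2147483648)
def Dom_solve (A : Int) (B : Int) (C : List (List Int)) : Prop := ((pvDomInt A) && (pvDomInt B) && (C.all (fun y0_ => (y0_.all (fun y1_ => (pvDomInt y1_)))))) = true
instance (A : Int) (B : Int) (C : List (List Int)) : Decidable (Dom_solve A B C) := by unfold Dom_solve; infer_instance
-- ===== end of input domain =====

-- B replaces A's per-element binary search over the next row by a single two-pointer merge scan per
-- adjacent pair of sorted rows (measured faster; equality is about the RETURN value — both Pythons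
-- also sort the first A rows of C in place, an identical side effect not modelled here).

-- ===== PORT A =====
-- shared prelude of both Pythons: 'for i in range(A): C[i].sort()'
def sortRows (A : Int) (C : List (List Int)) : List (List Int) :=
  (PySem.List.pyRange 0 A 1).foldl
    (fun M i => PySem.List.pySetD M i (PySem.List.sorted (PySem.List.pyGetD M i []) (fun x => x) false)) C

-- the 'while l <= r' loop of count_smaller (fuel is only a totality guard:
-- the loop shrinks r+1-l every iteration, so L.length + 1 steps always suffice)
def csGo (L : List Int) (x : Int) : Nat → Int → Int → Int
  | 0, l, _ => l
  | fuel + 1, l, r =>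
    if l ≤ r then
      let mid := PySem.Int.floordiv (l + r) 2
      let v := PySem.List.pyGetD L mid 0
      if v = x then mid
      else if v < x then csGo L x fuel (mid + 1) r
      else csGo L x fuel l (mid - 1)
    else l

def countSmaller (L : List Int) (x : Int) : Int :=
  csGo L x (L.length + 1) 0 ((L.length : Int) - 1)

def solve (A : Int) (B : Int) (C : List (List Int)) : Int :=
  let Cs := sortRows A C
  (PySem.List.pyRange 0 (A - 1) 1).foldl
    (fun ans i =>
      let row1 := PySem.List.pyGetD Cs i []
      let row2 := PySem.List.pyGetD Cs (i + 1) []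
      (PySem.List.pyRange 0 B 1).foldl
        (fun ans j =>
          let x := PySem.List.pyGetD row1 j 0
          let p0 := countSmaller row2 x
          let p := if p0 = B then p0 - 1 else p0
          let ans1 := min ans |PySem.List.pyGetD row2 p 0 - x|
          if 0 < p then min ans1 |PySem.List.pyGetD row2 (p - 1) 0 - x| else ans1)
        ans)
    (2147483648 : Int)  -- 1 << 31

-- ===== PORT B =====
-- the 'while p < len(X) and q < len(Y)' two-pointer merge of Source B (fuel is only a
-- totality guard: one pointer advances per iteration, so len(X)+len(Y) steps suffice)
def tpGo (X : List Int) (Y : List Int) : Nat → Int → Int → Int → Int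
  | 0, _, _, ans => ans
  | fuel + 1, p, q, ans =>
    if p < (X.length : Int) ∧ q < (Y.length : Int) then
      let x := PySem.List.pyGetD X p 0
      let y := PySem.List.pyGetD Y q 0
      let d := |x - y|
      let ans' := if d < ans then d else ans
      if x < y then tpGo X Y fuel (p + 1) q ans' else tpGo X Y fuel p (q + 1) ans'
    else ans

def solve_alt (A : Int) (B : Int) (C : List (List Int)) : Int :=
  let Cs := sortRows A C
  (PySem.List.pyRange 0 (A - 1) 1).foldl
    (fun ans i =>
      let X := PySem.List.pyGetD Cs i []
      let Y := PySem.List.pyGetD Cs (i + 1) []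
      tpGo X Y (X.length + Y.length) 0 0 ans)
    (2147483648 : Int)  -- 1 << 31

-- ===== PRECONDITION & SPEC =====
-- Pre_ needs A ≤ len(C) (otherwise A raises IndexError in the sort loop) and restricts to the
-- rectangular A×B matrices the function is written for: on non-rectangular input A's binary-search
-- indexing raises IndexError on some inputs and on others returns values accidental to the
-- 'p == B' clamp against the parameter B instead of the actual row length (see cites).
def Pre_solve (A : Int) (B : Int) (C : List (List Int)) : Prop :=
  A ≤ (C.length : Int) ∧ (2 ≤ A → ∀ r ∈ C.take A.toNat, (r.length : Int) = B)
instance (A : Int) (B : Int) (C : List (List Int)) : Decidable (Pre_solve A B C) := by unfold Pre_solve; infer_instance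
def pvWitness_solve : Int × Int × List (List Int) := (2, 2, [[3, 1], [4, 8]])

def Spec_solve (A : Int) (B : Int) (C : List (List Int)) (out : Int) : Prop := out = solve_alt A B C
instance (A : Int) (B : Int) (C : List (List Int)) (out : Int) : Decidable (Spec_solve A B C out) := by unfold Spec_solve; infer_instance

-- ===== CLAIM (what is proved, stated in full; the proofs are below) =====
def Claim_equal_solve : Prop := ∀ (A : Int) (B : Int) (C : List (List Int)), Dom_solve A B C → Pre_solve A B C → Spec_solve A B C (solve A B C)

-- ===== LEMMAS AND PROOFS =====


-- generic min-fold facts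
theorem fmin_le_init {α : Type} (g : α → Int) (l : List α) (init : Int) :
    l.foldl (fun a t => min a (g t)) init ≤ init := by
  induction l generalizing init with
  | nil => simp
  | cons h t ih => exact le_trans (ih _) (min_le_left _ _)

theorem fmin_le_mem {α : Type} (g : α → Int) (l : List α) {t : α} (ht : t ∈ l) (init : Int) :
    l.foldl (fun a t => min a (g t)) init ≤ g t := by
  induction l generalizing init with
  | nil => simp at ht
  | cons h tl ih =>
    rcases List.mem_cons.mp ht with h1 | h1
    · subst h1
      simp only [List.foldl_cons]
      exact le_trans (fmin_le_init g tl (min init (g t))) (min_le_right init (g t))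
    · exact ih h1 _

theorem fmin_cases {α : Type} (g : α → Int) (l : List α) (init : Int) :
    l.foldl (fun a t => min a (g t)) init = init ∨ ∃ t ∈ l, l.foldl (fun a t => min a (g t)) init = g t := by
  induction l generalizing init with
  | nil => left; rfl
  | cons h tl ih =>
    rcases ih (min init (g h)) with h1 | ⟨t, ht, h1⟩
    · rcases min_cases init (g h) with ⟨h2, _⟩ | ⟨h2, _⟩
      · left; simpa [h2] using h1
      · right; exact ⟨h, by simp, by simpa [h2] using h1⟩
    · right; exact ⟨t, by simp [ht], h1⟩

-- monotone access into a (≤)-sorted list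
theorem pw_mono (L : List Int) (hs : L.Pairwise (· ≤ ·)) (i j : Nat) (hij : i ≤ j)
    (hj : j < L.length) : L[i]'(lt_of_le_of_lt hij hj) ≤ L[j] := by
  rcases Nat.lt_or_eq_of_le hij with h | h
  · exact (List.pairwise_iff_getElem.mp hs) i j _ hj h
  · subst h; exact le_refl _

-- postcondition of the binary-search loop
theorem csGo_post (L : List Int) (x : Int) (hs : L.Pairwise (· ≤ ·)) :
    ∀ (n : Nat) (l r : Int), (r + 1 - l).toNat ≤ n → 0 ≤ l → l ≤ (L.length : Int) → r < (L.length : Int) →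
    (∀ (k : Nat) (hk : k < L.length), (k : Int) < l → L[k] < x) →
    (∀ (k : Nat) (hk : k < L.length), r < (k : Int) → x < L[k]) →
    0 ≤ csGo L x n l r ∧ csGo L x n l r ≤ (L.length : Int) ∧
      ((∃ hp : (csGo L x n l r).toNat < L.length, L[(csGo L x n l r).toNat] = x) ∨
       ((∀ (k : Nat) (hk : k < L.length), (k : Int) < csGo L x n l r → L[k] < x) ∧
        (∀ (k : Nat) (hk : k < L.length), csGo L x n l r ≤ (k : Int) → x < L[k]))) := by
  intro n
  induction n with
  | zero =>
    intro l r hm h0 hl hr hleft hright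
    simp only [csGo]
    exact ⟨h0, by omega, Or.inr ⟨hleft, fun k hk hkl => hright k hk (by omega)⟩⟩
  | succ n ih =>
    intro l r hm h0 hl hr hleft hright
    by_cases hlr : l ≤ r
    · simp only [csGo, if_pos hlr]
      have hmid := PySem.Int.floordiv_two_mid_bounds hlr
      set mid := PySem.Int.floordiv (l + r) 2 with hmiddef
      have h0m : 0 ≤ mid := le_trans h0 hmid.1
      have hmlen : mid < (L.length : Int) := lt_of_le_of_lt hmid.2 hr
      have hmlen' : mid.toNat < L.length := by omega
      have hv : PySem.List.pyGetD L mid 0 = L[mid.toNat] :=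
        PySem.List.pyGetD_eq_getElem L 0 h0m hmlen
      split_ifs with hveq hvlt
      · -- found: return mid
        rw [hv] at hveq
        refine ⟨h0m, by omega, Or.inl ⟨hmlen', hveq⟩⟩
      · -- go right: l := mid + 1
        rw [hv] at hvlt
        refine ih (mid + 1) r (by omega) (by omega) (by omega) hr ?_ hright
        intro k hk hkl
        by_cases hkl2 : (k : Int) < l
        · exact hleft k hk hkl2
        · calc L[k] ≤ L[mid.toNat] := pw_mono L hs k mid.toNat (by omega) hmlen'
            _ < x := hvlt
      · -- go left: r := mid - 1
        rw [hv] at hveq hvlt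
        have hvgt : x < L[mid.toNat] := by
          rcases lt_trichotomy (L[mid.toNat]) x with h | h | h
          · exact absurd h hvlt
          · exact absurd h hveq
          · exact h
        refine ih l (mid - 1) (by omega) h0 hl (by omega) hleft ?_
        intro k hk hkr
        by_cases hkr2 : r < (k : Int)
        · exact hright k hk hkr2
        · calc x < L[mid.toNat] := hvgt
            _ ≤ L[k] := pw_mono L hs mid.toNat k (by omega) hk
    · have heq : csGo L x (n + 1) l r = l := by simp only [csGo, if_neg hlr]
      rw [heq]
      exact ⟨h0, by omega, Or.inr ⟨hleft, fun k hk hkl => hright k hk (by omega)⟩⟩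

-- the per-element candidate value of port A, and its nearest-neighbour facts
def cmin (L : List Int) (x : Int) : Int :=
  let p0 := countSmaller L x
  let p := if p0 = (L.length : Int) then p0 - 1 else p0
  if 0 < p then min |PySem.List.pyGetD L p 0 - x| |PySem.List.pyGetD L (p - 1) 0 - x|
  else |PySem.List.pyGetD L p 0 - x|

theorem countSmaller_post (L : List Int) (x : Int) (hs : L.Pairwise (· ≤ ·)) :
    0 ≤ countSmaller L x ∧ countSmaller L x ≤ (L.length : Int) ∧
      ((∃ hp : (countSmaller L x).toNat < L.length, L[(countSmaller L x).toNat] = x) ∨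
       ((∀ (k : Nat) (hk : k < L.length), (k : Int) < countSmaller L x → L[k] < x) ∧
        (∀ (k : Nat) (hk : k < L.length), countSmaller L x ≤ (k : Int) → x < L[k]))) := by
  unfold countSmaller
  exact csGo_post L x hs (L.length + 1) 0 ((L.length : Int) - 1) (by omega) (by omega) (by omega)
    (by omega) (fun k hk h => absurd h (by omega)) (fun k hk h => absurd h (by omega))

theorem cmin_mem (L : List Int) (x : Int) (hs : L.Pairwise (· ≤ ·)) (hne : L ≠ []) :
    ∃ y ∈ L, cmin L x = |x - y| := by
  obtain ⟨hp00, hp0len, _⟩ := countSmaller_post L x hs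
  have hlen : 0 < L.length := List.length_pos_of_ne_nil hne
  unfold cmin
  dsimp only
  set p0 := countSmaller L x with hp0
  set p : Int := if p0 = (L.length : Int) then p0 - 1 else p0 with hpdef
  have hpb : 0 ≤ p ∧ p < (L.length : Int) := by rw [hpdef]; split_ifs with h <;> omega
  obtain ⟨hpge, hplt⟩ := hpb
  have e1 : PySem.List.pyGetD L p 0 = L[p.toNat]'(by omega) :=
    PySem.List.pyGetD_eq_getElem L 0 hpge hplt
  rw [e1]
  split_ifs with hppos
  · have e2 : PySem.List.pyGetD L (p - 1) 0 = L[(p - 1).toNat]'(by omega) :=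
      PySem.List.pyGetD_eq_getElem L 0 (by omega) (by omega)
    rw [e2]
    rcases le_total |L[p.toNat]'(by omega) - x| |L[(p - 1).toNat]'(by omega) - x| with h | h
    · exact ⟨L[p.toNat]'(by omega), List.getElem_mem _, by rw [min_eq_left h, abs_sub_comm]⟩
    · exact ⟨L[(p - 1).toNat]'(by omega), List.getElem_mem _, by rw [min_eq_right h, abs_sub_comm]⟩
  · exact ⟨L[p.toNat]'(by omega), List.getElem_mem _, by rw [abs_sub_comm]⟩

theorem cmin_lb (L : List Int) (x : Int) (hs : L.Pairwise (· ≤ ·)) (hne : L ≠ []) :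
    ∀ y ∈ L, cmin L x ≤ |x - y| := by
  intro y hy
  obtain ⟨k, hk, rfl⟩ := List.mem_iff_getElem.mp hy
  obtain ⟨hp00, hp0len, hpost3⟩ := countSmaller_post L x hs
  have hlen : 0 < L.length := List.length_pos_of_ne_nil hne
  unfold cmin
  dsimp only
  set p0 := countSmaller L x with hp0
  set p : Int := if p0 = (L.length : Int) then p0 - 1 else p0 with hpdef
  have hpb : 0 ≤ p ∧ p < (L.length : Int) := by rw [hpdef]; split_ifs with h <;> omega
  obtain ⟨hpge, hplt⟩ := hpb
  have hpnat : p.toNat < L.length := by omega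
  have e1 : PySem.List.pyGetD L p 0 = L[p.toNat]'hpnat :=
    PySem.List.pyGetD_eq_getElem L 0 hpge hplt
  rw [e1]
  have hcle1 : (if 0 < p then min |L[p.toNat]'hpnat - x| |PySem.List.pyGetD L (p - 1) 0 - x|
      else |L[p.toNat]'hpnat - x|) ≤ |L[p.toNat]'hpnat - x| := by
    split_ifs with h
    · exact min_le_left _ _
    · exact le_refl _
  rcases hpost3 with ⟨hfound, heq⟩ | ⟨hL, hR⟩
  · -- found an equal element: the candidate distance is 0
    have hpp0 : p = p0 := by rw [hpdef]; split_ifs with h <;> omega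
    have hz : |L[p.toNat]'hpnat - x| = 0 := by
      have : L[p.toNat]'hpnat = x := by
        have : p.toNat = p0.toNat := by omega
        simp only [this]; exact heq
      simp [this]
    refine le_trans hcle1 (by rw [hz]; exact abs_nonneg _)
  · have hple : p ≤ p0 := by rw [hpdef]; split_ifs with h <;> omega
    have hpge' : p0 - 1 ≤ p := by rw [hpdef]; split_ifs with h <;> omega
    by_cases hklt : (k : Int) < p0
    · -- k lies strictly left of the insertion point
      have hkx : L[k] < x := hL k hk hklt
      by_cases hkp : (k : Int) < p
      · -- use the p-1 candidate
        have hppos : 0 < p := by omega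
        have hp1nat : (p - 1).toNat < L.length := by omega
        have e2 : PySem.List.pyGetD L (p - 1) 0 = L[(p - 1).toNat]'hp1nat :=
          PySem.List.pyGetD_eq_getElem L 0 (by omega) (by omega)
        rw [if_pos hppos, e2]
        have hp1x : L[(p - 1).toNat]'hp1nat < x := hL _ hp1nat (by omega)
        have hmono : L[k] ≤ L[(p - 1).toNat]'hp1nat := pw_mono L hs k _ (by omega) hp1nat
        have ha1 : |L[(p - 1).toNat]'hp1nat - x| = x - L[(p - 1).toNat]'hp1nat := by
          rw [abs_of_nonpos (by omega)]; ring
        have ha2 : |x - L[k]| = x - L[k] := abs_of_nonneg (by omega)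
        calc min |L[p.toNat]'hpnat - x| |L[(p - 1).toNat]'hp1nat - x|
            ≤ |L[(p - 1).toNat]'hp1nat - x| := min_le_right _ _
          _ ≤ |x - L[k]| := by rw [ha1, ha2]; omega
      · -- k is exactly the (clamped) position p
        have hLpk : L[p.toNat]'hpnat = L[k] := by congr 1; omega
        refine le_trans hcle1 ?_
        rw [hLpk, abs_sub_comm]
    · -- k lies at or right of the insertion point: use the p candidate
      have hp0lt : p0 < (L.length : Int) := by omega
      have hpp0 : p = p0 := by omega
      have hpx : x < L[p.toNat]'hpnat := hR _ hpnat (by omega)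
      have hkx : x < L[k] := hR k hk (by omega)
      have hmono : L[p.toNat]'hpnat ≤ L[k] := pw_mono L hs _ k (by omega) hk
      have ha1 : |L[p.toNat]'hpnat - x| = L[p.toNat]'hpnat - x := abs_of_nonneg (by omega)
      have ha2 : |x - L[k]| = L[k] - x := by rw [abs_of_nonpos (by omega)]; ring
      refine le_trans hcle1 ?_
      rw [ha1, ha2]; omega

-- A's inner body is 'min ans (cmin L x)'
theorem abody_eq_min_cmin (L : List Int) (x ans : Int) :
    (let p0 := countSmaller L x
     let p := if p0 = (L.length : Int) then p0 - 1 else p0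
     let ans1 := min ans |PySem.List.pyGetD L p 0 - x|
     if 0 < p then min ans1 |PySem.List.pyGetD L (p - 1) 0 - x| else ans1)
    = min ans (cmin L x) := by
  unfold cmin
  dsimp only
  split_ifs <;> simp [min_assoc]

-- postcondition of the two-pointer loop
theorem tpGo_post (X Y : List Int) (hX : X.Pairwise (· ≤ ·)) (hY : Y.Pairwise (· ≤ ·)) :
    ∀ (n : Nat) (p q ans : Int), (((X.length : Int) - p + ((Y.length : Int) - q)).toNat ≤ n) →
    0 ≤ p → 0 ≤ q →
    tpGo X Y n p q ans ≤ ans ∧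
    (tpGo X Y n p q ans = ans ∨ ∃ a ∈ X, ∃ b ∈ Y, tpGo X Y n p q ans = |a - b|) ∧
    (∀ (i j : Nat) (hi : i < X.length) (hj : j < Y.length), p ≤ (i : Int) → q ≤ (j : Int) →
      tpGo X Y n p q ans ≤ |X[i] - Y[j]|) := by
  intro n
  induction n with
  | zero =>
    intro p q ans hm hp hq
    exact ⟨le_refl _, Or.inl rfl, fun i j hi hj hpi hqj => absurd hm (by omega)⟩
  | succ n ih =>
    intro p q ans hm hp hq
    by_cases hcond : p < (X.length : Int) ∧ q < (Y.length : Int)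
    · simp only [tpGo, if_pos hcond]
      obtain ⟨hpX, hqY⟩ := hcond
      have hpn : p.toNat < X.length := by omega
      have hqn : q.toNat < Y.length := by omega
      have ex : PySem.List.pyGetD X p 0 = X[p.toNat]'hpn := PySem.List.pyGetD_eq_getElem X 0 hp hpX
      have ey : PySem.List.pyGetD Y q 0 = Y[q.toNat]'hqn := PySem.List.pyGetD_eq_getElem Y 0 hq hqY
      rw [ex, ey]
      set d := |X[p.toNat]'hpn - Y[q.toNat]'hqn| with hd
      set ans' := if d < ans then d else ans with hans'
      have hans'le : ans' ≤ ans := by rw [hans']; split_ifs <;> omega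
      have hans'd : ans' ≤ d := by rw [hans']; split_ifs <;> simp [hd] <;> omega
      have hans'cases : ans' = ans ∨ ans' = d := by rw [hans']; split_ifs <;> simp
      clear_value ans' d
      split_ifs with hxy
      · obtain ⟨ha, hb, hc⟩ := ih (p + 1) q ans' (by omega) (by omega) hq
        refine ⟨le_trans ha hans'le, ?_, ?_⟩
        · rcases hb with h | h
          · rcases hans'cases with h2 | h2
            · exact Or.inl (h.trans h2)
            · exact Or.inr ⟨X[p.toNat]'hpn, List.getElem_mem _, Y[q.toNat]'hqn,
                List.getElem_mem _, (h.trans h2).trans hd⟩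
          · exact Or.inr h
        · intro i j hi hj hpi hqj
          clear hb
          by_cases hip : p + 1 ≤ (i : Int)
          · exact hc i j hi hj hip hqj
          · have hieq : i = p.toNat := by omega
            subst hieq
            have hyj : Y[q.toNat]'hqn ≤ Y[j] := pw_mono Y hY q.toNat j (by omega) hj
            have h1 : X[p.toNat]'hpn - Y[q.toNat]'hqn ≤ 0 := by omega
            have h2 : X[p.toNat]'hpn - Y[j] ≤ 0 := by omega
            have habs : d ≤ |X[p.toNat]'hpn - Y[j]| := by
              rw [hd, abs_of_nonpos h1, abs_of_nonpos h2]; omega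
            exact le_trans ha (le_trans hans'd habs)
      · obtain ⟨ha, hb, hc⟩ := ih p (q + 1) ans' (by omega) hp (by omega)
        refine ⟨le_trans ha hans'le, ?_, ?_⟩
        · rcases hb with h | h
          · rcases hans'cases with h2 | h2
            · exact Or.inl (h.trans h2)
            · exact Or.inr ⟨X[p.toNat]'hpn, List.getElem_mem _, Y[q.toNat]'hqn,
                List.getElem_mem _, (h.trans h2).trans hd⟩
          · exact Or.inr h
        · intro i j hi hj hpi hqj
          clear hb
          by_cases hjq : q + 1 ≤ (j : Int)
          · exact hc i j hi hj hpi hjq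
          · have hjeq : j = q.toNat := by omega
            subst hjeq
            have hxi : X[p.toNat]'hpn ≤ X[i] := pw_mono X hX p.toNat i (by omega) hi
            have h1 : 0 ≤ X[p.toNat]'hpn - Y[q.toNat]'hqn := by omega
            have h2 : 0 ≤ X[i] - Y[q.toNat]'hqn := by omega
            have habs : d ≤ |X[i] - Y[q.toNat]'hqn| := by
              rw [hd, abs_of_nonneg h1, abs_of_nonneg h2]; omega
            exact le_trans ha (le_trans hans'd habs)
    · have heq : tpGo X Y (n + 1) p q ans = ans := by simp only [tpGo, if_neg hcond]
      rw [heq]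
      exact ⟨le_refl _, Or.inl rfl,
        fun i j hi hj hpi hqj => absurd ⟨by omega, by omega⟩ hcond⟩

-- the characterization determines the value uniquely
theorem min_char_unique (X Y : List Int) (ans r1 r2 : Int)
    (h1a : r1 ≤ ans) (h1b : r1 = ans ∨ ∃ a ∈ X, ∃ b ∈ Y, r1 = |a - b|)
    (h1c : ∀ a ∈ X, ∀ b ∈ Y, r1 ≤ |a - b|)
    (h2a : r2 ≤ ans) (h2b : r2 = ans ∨ ∃ a ∈ X, ∃ b ∈ Y, r2 = |a - b|)
    (h2c : ∀ a ∈ X, ∀ b ∈ Y, r2 ≤ |a - b|) : r1 = r2 := by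
  apply le_antisymm
  · rcases h2b with h | ⟨a, ha, b, hb, h⟩
    · omega
    · have := h1c a ha b hb; omega
  · rcases h1b with h | ⟨a, ha, b, hb, h⟩
    · omega
    · have := h2c a ha b hb; omega

-- per adjacent pair of rows, A's binary-search scan equals B's two-pointer merge
theorem pair_eq (X Y : List Int) (Bi : Int) (hX : X.Pairwise (· ≤ ·)) (hY : Y.Pairwise (· ≤ ·))
    (hlX : (X.length : Int) = Bi) (hlY : (Y.length : Int) = Bi) (ans : Int) :
    (PySem.List.pyRange 0 Bi 1).foldl
      (fun ans j =>
        let x := PySem.List.pyGetD X j 0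
        let p0 := countSmaller Y x
        let p := if p0 = Bi then p0 - 1 else p0
        let ans1 := min ans |PySem.List.pyGetD Y p 0 - x|
        if 0 < p then min ans1 |PySem.List.pyGetD Y (p - 1) 0 - x| else ans1)
      ans
    = tpGo X Y (X.length + Y.length) 0 0 ans := by
  by_cases hX0 : X.length = 0
  · have hY0 : Y.length = 0 := by omega
    have hBi : Bi = 0 := by omega
    subst hBi
    rw [PySem.List.pyRange_one_eq_nil (le_refl 0), show X.length + Y.length = 0 by omega]
    simp only [tpGo]
    rfl
  · have hXne : X ≠ [] := by intro h; rw [h] at hX0; exact hX0 rfl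
    have hYne : Y ≠ [] := by intro h; rw [h] at hlY; simp at hlY; omega
    have hbody : ∀ (a j : Int),
        (let x := PySem.List.pyGetD X j 0
         let p0 := countSmaller Y x
         let p := if p0 = Bi then p0 - 1 else p0
         let ans1 := min a |PySem.List.pyGetD Y p 0 - x|
         if 0 < p then min ans1 |PySem.List.pyGetD Y (p - 1) 0 - x| else ans1)
        = min a (cmin Y (PySem.List.pyGetD X j 0)) := by
      intro a j
      have h := abody_eq_min_cmin Y (PySem.List.pyGetD X j 0) a
      rw [hlY] at h
      exact h
    rw [PySem.List.foldl_congr_mem _ _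
      (fun a j => min a (cmin Y (PySem.List.pyGetD X j 0))) ans
      (fun acc x _ => hbody acc x)]
    rw [← hlX]
    rw [PySem.List.foldl_pyRange_zero_pyGetD' X 0 (fun a x => min a (cmin Y x)) ans]
    -- both sides are the minimum of ans and all cross distances
    have hsY := hY
    obtain ⟨hB1, hB2, hB3⟩ := tpGo_post X Y hX hY (X.length + Y.length) 0 0 ans
      (by omega) (le_refl 0) (le_refl 0)
    apply min_char_unique X Y ans _ _ (fmin_le_init (cmin Y) X ans) ?_ ?_ hB1 hB2 ?_
    · rcases fmin_cases (cmin Y) X ans with h | ⟨t, ht, h⟩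
      · exact Or.inl h
      · obtain ⟨y, hy, hcy⟩ := cmin_mem Y t hY hYne
        exact Or.inr ⟨t, ht, y, hy, h.trans hcy⟩
    · intro a ha b hb
      exact le_trans (fmin_le_mem (cmin Y) X ha ans) (cmin_lb Y a hY hYne b hb)
    · intro a ha b hb
      obtain ⟨i, hi, rfl⟩ := List.mem_iff_getElem.mp ha
      obtain ⟨j, hj, rfl⟩ := List.mem_iff_getElem.mp hb
      exact hB3 i j hi hj (by omega) (by omega)

-- the shared sorting prelude preserves the shape of C
theorem sortRows_length (A : Int) (C : List (List Int)) : (sortRows A C).length = C.length := by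
  unfold sortRows
  generalize PySem.List.pyRange 0 A 1 = l
  induction l generalizing C with
  | nil => rfl
  | cons h t ih =>
    simp only [List.foldl_cons]
    rw [ih]
    exact PySem.List.length_pySetD _ _ _

-- the shared sorting prelude: entry i is sorted(C[i]) for i < n, untouched otherwise
theorem sortRows_get (n : Nat) : ∀ (C : List (List Int)), n ≤ C.length →
    ∀ (i : Nat) (hi : i < C.length),
      (sortRows (n : Int) C).getD i [] =
        if i < n then PySem.List.sorted (C[i]) (fun x => x) false else C[i] := by
  induction n with
  | zero =>
    intro C hn i hi
    unfold sortRows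
    rw [show ((0 : Nat) : Int) = 0 by rfl, PySem.List.pyRange_one_eq_nil (le_refl 0)]
    simp [List.getD_eq_getElem?_getD, hi]
  | succ n ih =>
    intro C hn i hi
    unfold sortRows
    rw [show ((n + 1 : Nat) : Int) = (n : Int) + 1 by push_cast; ring,
      PySem.List.pyRange_one_succ_right (by omega), List.foldl_append]
    have hSfold : (PySem.List.pyRange 0 (n : Int) 1).foldl
        (fun M i => PySem.List.pySetD M i (PySem.List.sorted (PySem.List.pyGetD M i []) (fun x => x) false)) C
        = sortRows (n : Int) C := rfl
    simp only [List.foldl_cons, List.foldl_nil, hSfold]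
    have hSlen : (sortRows (n : Int) C).length = C.length := sortRows_length _ _
    have hgn : PySem.List.pyGetD (sortRows (n : Int) C) (n : Int) [] = C[n]'(by omega) := by
      rw [PySem.List.pyGetD_natCast, ih C (by omega) n (by omega)]
      rw [if_neg (by omega)]
    rw [hgn, PySem.List.pySetD_natCast]
    rw [List.getD_eq_getElem?_getD, List.getElem?_set]
    by_cases hin : n = i
    · subst hin
      simp [hSlen, hi]
    · rw [if_neg hin]
      have : (sortRows (n : Int) C)[i]? = some ((sortRows (n : Int) C).getD i []) := by
        rw [List.getElem?_eq_getElem (by omega)]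
        rw [List.getD_eq_getElem?_getD, List.getElem?_eq_getElem (by omega)]
        rfl
      rw [this]
      rw [ih C (by omega) i hi]
      simp only [Option.getD_some]
      by_cases hilt : i < n
      · rw [if_pos hilt, if_pos (by omega)]
      · rw [if_neg hilt, if_neg (by omega)]


-- rows 0..A-1 of the sorted matrix, as seen through pyGetD
theorem rows_sorted (A : Int) (C : List (List Int)) (hA : A ≤ (C.length : Int)) (z : Int)
    (h0 : 0 ≤ z) (hz : z < A) :
    PySem.List.pyGetD (sortRows A C) z [] =
      PySem.List.sorted (C.getD z.toNat []) (fun x => x) false := by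
  have hAn : A = ((A.toNat : Nat) : Int) := by omega
  have hzn : z = ((z.toNat : Nat) : Int) := by omega
  rw [hAn, hzn, PySem.List.pyGetD_natCast]
  rw [sortRows_get A.toNat C (by omega) z.toNat (by omega)]
  rw [if_pos (by omega)]
  congr 1
  rw [List.getD_eq_getElem?_getD, List.getElem?_eq_getElem (by omega)]
  rfl

-- ===== VERDICT (by name: the statement is the Claim_ definition above) =====
theorem solve_spec : Claim_equal_solve := by
  intro A B C hdom hpre
  obtain ⟨hAlen, hrect⟩ := hpre
  unfold Spec_solve solve solve_alt
  dsimp only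
  apply PySem.List.foldl_congr_mem
  intro acc i hi
  rw [PySem.List.mem_pyRange_one] at hi
  obtain ⟨hi0, hiA⟩ := hi
  have hA2 : 2 ≤ A := by omega
  have hrow : ∀ (z : Int), 0 ≤ z → z < A →
      (PySem.List.pyGetD (sortRows A C) z []).Pairwise (· ≤ ·) ∧
      ((PySem.List.pyGetD (sortRows A C) z []).length : Int) = B := by
    intro z h0 hz
    rw [rows_sorted A C hAlen z h0 hz]
    constructor
    · exact PySem.List.sorted_pairwise _ _
    · rw [PySem.List.length_sorted]
      have hzlen : z.toNat < C.length := by omega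
      have hmem : C.getD z.toNat [] ∈ C.take A.toNat := by
        rw [List.getD_eq_getElem?_getD, List.getElem?_eq_getElem hzlen]
        simp only [Option.getD_some]
        have : (C.take A.toNat)[z.toNat]'(by simp [List.length_take]; omega) = C[z.toNat] :=
          List.getElem_take
        rw [← this]
        exact List.getElem_mem _
      exact hrect hA2 _ hmem
  obtain ⟨hXs, hXlen⟩ := hrow i hi0 (by omega)
  obtain ⟨hYs, hYlen⟩ := hrow (i + 1) (by omega) (by omega)
  exact pair_eq _ _ B hXs hYs hXlen hYlen acc
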